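-- pv_equiv track=rewrite | github.com/Hehwang/Leetcode-Python | code/290 Word Pattern.py | helper2
-- ===== SOURCE A (Python) =====
-- def helper2(s):
--     tmpdict={}
--     res=''
--     s=[x for x in s.split()]
--     for i in range(len(s)):
--         if not s[i] in tmpdict:
--             tmpdict[s[i]]=str(i)
--             res+=str(i)
--         else:
--             res+=tmpdict[s[i]]
--     return res
-- ===== SOURCE B (Python) =====
-- def helper2(s):
--     words = s.split()
--     # Pass 1: build the first-occurrence table back-to-front: iterating from the
--     # last word to the first, each overwrite makes the EARLIEST index win,
--     # so no membership test or branch is needed.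
--     first = {}
--     for i in range(len(words) - 1, -1, -1):
--         first[words[i]] = str(i)
--     # Pass 2: map every word through the finished table and join.
--     return ''.join(first[w] for w in words)
-- ===== Notes on version B (the rewrite author's own statement) =====
-- stated objective: alternative
-- what changed: Replaces A's single forward pass with a membership branch and incremental string accumulation by two staged passes: the first-occurrence table is built back-to-front with unconditional overwrites (earliest index wins, no branch), then a separate pass maps every word through the finished table and joins.
import Mathlib
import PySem

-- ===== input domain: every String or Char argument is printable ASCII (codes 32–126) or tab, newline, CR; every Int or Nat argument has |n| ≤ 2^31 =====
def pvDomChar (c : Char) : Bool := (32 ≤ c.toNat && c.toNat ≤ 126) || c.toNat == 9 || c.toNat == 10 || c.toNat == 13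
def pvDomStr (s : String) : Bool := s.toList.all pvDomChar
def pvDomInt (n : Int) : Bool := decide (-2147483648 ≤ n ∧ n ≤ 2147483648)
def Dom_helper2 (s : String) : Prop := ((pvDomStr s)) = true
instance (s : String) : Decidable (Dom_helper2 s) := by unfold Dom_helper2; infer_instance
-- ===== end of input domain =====

-- B replaces A's single forward pass (membership branch + incremental output) by two
-- staged passes: build the first-occurrence table back-to-front with unconditional
-- overwrites, then map every word through it and join (objective: alternative).

-- ===== PORT A =====
def helper2 (s : String) : String :=
  let ws := PySem.Str.split₀ s
  ((PySem.List.pyRange 0 (ws.length : Int) 1).foldl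
    (fun (st : PySem.Dict String String × String) i =>
      let w := PySem.List.pyGetD ws i ""
      if st.1.contains w = false then
        (st.1.insert w (PySem.Int.toStr i), st.2 ++ PySem.Int.toStr i)
      else
        (st.1, st.2 ++ st.1.getD w ""))
    (PySem.Dict.empty, "")).2

-- ===== PORT B =====
def helper2_alt (s : String) : String :=
  let ws := PySem.Str.split₀ s
  let first := (PySem.List.pyRange ((ws.length : Int) - 1) (-1) (-1)).foldl
    (fun (d : PySem.Dict String String) i =>
      d.insert (PySem.List.pyGetD ws i "") (PySem.Int.toStr i))
    PySem.Dict.empty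
  -- first[w]: the key is always present (every w ∈ ws was inserted), so getD is exact
  PySem.Str.join "" (ws.map (fun w => first.getD w ""))

-- ===== PRECONDITION & SPEC =====
def Spec_helper2 (s : String) (out : String) : Prop := out = helper2_alt s
instance (s : String) (out : String) : Decidable (Spec_helper2 s out) := by unfold Spec_helper2; infer_instance

-- ===== CLAIM (what is proved, stated in full; the proofs are below) =====
def Claim_equal_helper2 : Prop := ∀ (s : String), Dom_helper2 s → Spec_helper2 s (helper2 s)

-- ===== LEMMAS AND PROOFS =====

-- the common value: str(first-occurrence index of w in ws)
def pvF (ws : List String) (w : String) : String :=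
  PySem.Int.toStr (((PySem.List.index? ws w).getD 0 : Nat) : Int)

-- A's loop body, restated over a Nat index (what the pyRange fold reduces to)
def pvStep (ws : List String) (st : PySem.Dict String String × String) (k : Nat) :
    PySem.Dict String String × String :=
  let w := ws.getD k ""
  if st.1.contains w = false then
    (st.1.insert w (PySem.Int.toStr (k : Int)), st.2 ++ PySem.Int.toStr (k : Int))
  else
    (st.1, st.2 ++ st.1.getD w "")

theorem join_empty_flatten (ps : List (List Char)) : PySem.Chars.join [] ps = ps.flatten := by
  induction ps with
  | nil => rfl
  | cons p ps ih =>
    cases ps with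
    | nil => simp [pysem]
    | cons q qs => rw [PySem.Chars.join_cons_cons] at *; simp_all

theorem index?_first (xs : List String) (n : Nat) (h : n < xs.length)
    (hnot : xs[n] ∉ xs.take n) : PySem.List.index? xs xs[n] = some n := by
  rw [PySem.List.index?_eq_some_iff]
  exact ⟨xs.take n, xs.drop (n+1),
    by rw [← List.drop_eq_getElem_cons h, List.take_append_drop],
    by simp [Nat.min_eq_left (le_of_lt h)], hnot⟩

-- Invariant of A's loop: the dict maps each seen word to pvF, and the output string is
-- the concatenation of pvF over the prefix processed so far.
theorem pvLoop_inv (ws : List String) (n : Nat) (hn : n ≤ ws.length) :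
    (∀ w, ((List.range n).foldl (pvStep ws) (PySem.Dict.empty, "")).1.get? w
        = if w ∈ ws.take n then some (pvF ws w) else none) ∧
    ((List.range n).foldl (pvStep ws) (PySem.Dict.empty, "")).2.toList
        = ((ws.take n).map (fun w => (pvF ws w).toList)).flatten := by
  induction n with
  | zero => simp [PySem.Dict.get?_empty]
  | succ n ih =>
    obtain ⟨ihd, ihs⟩ := ih (Nat.le_of_succ_le hn)
    have hlt : n < ws.length := hn
    rw [List.range_succ, List.foldl_append, List.foldl_cons, List.foldl_nil]
    set st := (List.range n).foldl (pvStep ws) (PySem.Dict.empty, "") with hst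
    have hw : ws[n]?.getD "" = ws[n] := by
      rw [List.getElem?_eq_getElem hlt, Option.getD_some]
    have htake : ws.take (n+1) = ws.take n ++ [ws[n]] := by
      rw [List.take_add_one, List.getElem?_eq_getElem hlt]; rfl
    by_cases hmem : ws[n] ∈ ws.take n
    · -- already seen: dict unchanged, append the stored value
      have hget : st.1.get? ws[n] = some (pvF ws ws[n]) := by rw [ihd]; simp [hmem]
      have hcont : st.1.contains ws[n] = true := by
        rw [PySem.Dict.contains_eq_isSome_get?, hget]; rfl
      have hstep : pvStep ws st n = (st.1, st.2 ++ st.1.getD ws[n] "") := by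
        simp [pvStep, List.getD_eq_getElem?_getD, hw, hcont]
      rw [hstep]
      constructor
      · intro w; rw [ihd, htake]; simp only [List.mem_append, List.mem_singleton]
        by_cases h' : w ∈ ws.take n
        · simp [h']
        · by_cases h'' : w = ws[n] <;> simp [h', h'', hmem]
      · rw [String.toList_append, ihs, htake,
          PySem.Dict.getD_eq_get?_getD, hget, Option.getD_some,
          List.map_append, List.flatten_append]
        simp
    · -- first occurrence: insert, append str(n)
      have hcont : st.1.contains ws[n] = false := by
        rw [PySem.Dict.contains_eq_isSome_get?, ihd]; simp [hmem]
      have hfn : pvF ws ws[n] = PySem.Int.toStr (n : Int) := by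
        unfold pvF; rw [index?_first ws n hlt hmem, Option.getD_some]
      have hstep : pvStep ws st n
          = (st.1.insert ws[n] (PySem.Int.toStr (n : Int)),
             st.2 ++ PySem.Int.toStr (n : Int)) := by
        simp [pvStep, List.getD_eq_getElem?_getD, hw, hcont]
      rw [hstep]
      constructor
      · intro w
        rw [PySem.Dict.get?_insert, ihd, htake]
        simp only [List.mem_append, List.mem_singleton]
        by_cases h'' : w = ws[n]
        · simp [h'', hfn]
        · by_cases h' : w ∈ ws.take n <;> simp [h', h'']
      · rw [String.toList_append, ihs, htake, List.map_append, List.flatten_append]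
        simp [hfn]

-- B's backward loop body over a Nat index
def pvStepB (ws : List String) (d : PySem.Dict String String) (k : Nat) :
    PySem.Dict String String :=
  d.insert (ws.getD k "") (PySem.Int.toStr (k : Int))

-- Invariant of B's backward loop: folding the inserts for indices n-1, …, 0 (in that
-- order) on top of d maps every word of ws.take n to pvF restricted to that prefix
-- (the LAST insert for a word is its smallest index), and leaves other keys as in d.
theorem pvLoopB_inv (ws : List String) (n : Nat) (hn : n ≤ ws.length)
    (d : PySem.Dict String String) :
    ∀ w, (((List.range n).reverse).foldl (pvStepB ws) d).get? w
        = if w ∈ ws.take n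
          then some (PySem.Int.toStr (((PySem.List.index? (ws.take n) w).getD 0 : Nat) : Int))
          else d.get? w := by
  induction n generalizing d with
  | zero => simp
  | succ n ih =>
    intro w
    have hlt : n < ws.length := hn
    have hw : ws[n]?.getD "" = ws[n] := by
      rw [List.getElem?_eq_getElem hlt, Option.getD_some]
    have htake : ws.take (n+1) = ws.take n ++ [ws[n]] := by
      rw [List.take_add_one, List.getElem?_eq_getElem hlt]; rfl
    have hrev : ((List.range (n+1)).reverse) = n :: (List.range n).reverse := by
      rw [List.range_succ, List.reverse_append]; rfl
    rw [hrev, List.foldl_cons, ih (Nat.le_of_succ_le hn)]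
    have hlen : (ws.take n).length = n := by simp [Nat.min_eq_left (le_of_lt hlt)]
    by_cases hmem : w ∈ ws.take n
    · -- w occurs before index n: index? is decided inside the prefix
      have hmem1 : w ∈ ws.take (n+1) := by
        rw [htake]; exact List.mem_append_left _ hmem
      have hidx : PySem.List.index? (ws.take (n+1)) w = PySem.List.index? (ws.take n) w := by
        rw [htake]; exact PySem.List.index?_append_of_mem _ hmem
      rw [if_pos hmem, if_pos hmem1, hidx]
    · by_cases heq : w = ws[n]
      · -- first occurrence of w is exactly index n
        have hmem1 : w ∈ ws.take (n+1) := by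
          rw [htake, heq]; exact List.mem_append_right _ (List.mem_singleton.mpr rfl)
        have hidx : PySem.List.index? (ws.take (n+1)) w = some n := by
          rw [htake, heq, PySem.List.index?_eq_some_iff]
          exact ⟨ws.take n, [], rfl, hlen, by rw [← heq]; exact hmem⟩
        have hget : (pvStepB ws d n).get? w = some (PySem.Int.toStr (n : Int)) := by
          unfold pvStepB
          rw [List.getD_eq_getElem?_getD, hw, ← heq, PySem.Dict.get?_insert_self]
        rw [if_neg hmem, if_pos hmem1, hidx, hget, Option.getD_some]
      · -- w untouched by this insert
        have hmem1 : w ∉ ws.take (n+1) := by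
          rw [htake]; intro h
          rcases List.mem_append.mp h with h' | h'
          · exact hmem h'
          · exact heq (List.mem_singleton.mp h')
        have hget : (pvStepB ws d n).get? w = d.get? w := by
          unfold pvStepB
          rw [List.getD_eq_getElem?_getD, hw, PySem.Dict.get?_insert_of_ne _ _ heq]
        rw [if_neg hmem, if_neg hmem1, hget]

theorem helper2_eq_alt (s : String) : helper2 s = helper2_alt s := by
  apply String.toList_inj.mp
  simp only [helper2, helper2_alt]
  set ws := PySem.Str.split₀ s with hws
  -- A's fold over pyRange is the fold of pvStep over List.range
  have hbody : (PySem.List.pyRange 0 (ws.length : Int) 1).foldl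
      (fun (st : PySem.Dict String String × String) i =>
        let w := PySem.List.pyGetD ws i ""
        if st.1.contains w = false then
          (st.1.insert w (PySem.Int.toStr i), st.2 ++ PySem.Int.toStr i)
        else
          (st.1, st.2 ++ st.1.getD w ""))
      (PySem.Dict.empty, "")
      = (List.range ws.length).foldl (pvStep ws) (PySem.Dict.empty, "") := by
    rw [PySem.List.pyRange_one]
    have h0 : (((ws.length : Int)) - 0).toNat = ws.length := by simp
    rw [h0, List.foldl_map]
    refine PySem.List.foldl_congr_mem _ _ _ _ ?_
    intro acc k _
    simp [pvStep, PySem.List.pyGetD_natCast]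
  -- B's countdown fold over pyRange is the fold of pvStepB over (List.range n).reverse
  have hbodyB : (PySem.List.pyRange ((ws.length : Int) - 1) (-1) (-1)).foldl
      (fun (d : PySem.Dict String String) i =>
        d.insert (PySem.List.pyGetD ws i "") (PySem.Int.toStr i))
      PySem.Dict.empty
      = ((List.range ws.length).reverse).foldl (pvStepB ws) PySem.Dict.empty := by
    rw [PySem.List.pyRange_neg_one]
    have h1 : (((ws.length : Int) - 1) - (-1)).toNat = ws.length := by omega
    rw [h1, List.foldl_map]
    have hrev : (List.range ws.length).reverse
        = (List.range ws.length).map (fun k => ws.length - 1 - k) := by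
      apply List.ext_getElem (by simp)
      intro i h1' h2'
      simp only [List.getElem_reverse, List.getElem_map, List.getElem_range, List.length_range]
    rw [hrev, List.foldl_map]
    refine PySem.List.foldl_congr_mem _ _ _ _ ?_
    intro acc k hk
    have hk' : k < ws.length := List.mem_range.mp hk
    have hcast : ((ws.length : Int) - 1 - (k : Int)) = ((ws.length - 1 - k : Nat) : Int) := by
      omega
    simp [pvStepB, hcast, PySem.List.pyGetD_natCast]
  rw [hbody, hbodyB, (pvLoop_inv ws ws.length le_rfl).2]
  -- the finished table agrees with pvF on every word of ws
  have hmap : ws.map (fun w =>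
      (((List.range ws.length).reverse).foldl (pvStepB ws) PySem.Dict.empty).getD w "")
      = ws.map (pvF ws) := by
    refine List.map_congr_left ?_
    intro w hw
    rw [PySem.Dict.getD_eq_get?_getD, pvLoopB_inv ws ws.length le_rfl PySem.Dict.empty w]
    simp [List.take_length, hw, pvF]
  rw [hmap, PySem.Str.toList_join]
  have hnil : ("" : String).toList = ([] : List Char) := rfl
  rw [hnil, join_empty_flatten]
  simp [List.map_map, Function.comp_def]

-- ===== VERDICT (by name: the statement is the Claim_ definition above) =====
theorem helper2_spec : Claim_equal_helper2 := by
  intro s _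
  unfold Spec_helper2
  exact helper2_eq_alt s
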